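-- pv_equiv track=rewrite | github.com/Valeryio/Cryptographic-Algorithms | Hill's Algorithm/functions.py | break_strings
-- ===== SOURCE A (Python) =====
-- def break_strings(var):
--
--     chain = list(var)
--
--     a = []
--     breaked_string = []
--
--     for i in range(len(chain)):
--
--         a.append(chain[i])
--
--         if( (i % 2) != 0):
--             breaked_string.append(a)
--             a = []
--
--     return breaked_string
-- ===== SOURCE B (Python) =====
-- def break_strings(var):
--     chain = list(var)
--     return [[x, y] for x, y in zip(chain[::2], chain[1::2])]
-- ===== Notes on version B (the rewrite author's own statement) =====
-- stated objective: idiomatic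
-- what changed: Replaced the index-parity accumulator loop (append each char to a pending pair, flush on odd index) with zipping the two strided slices chain[::2] and chain[1::2], where zip drops any trailing unpaired character.
import Mathlib
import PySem

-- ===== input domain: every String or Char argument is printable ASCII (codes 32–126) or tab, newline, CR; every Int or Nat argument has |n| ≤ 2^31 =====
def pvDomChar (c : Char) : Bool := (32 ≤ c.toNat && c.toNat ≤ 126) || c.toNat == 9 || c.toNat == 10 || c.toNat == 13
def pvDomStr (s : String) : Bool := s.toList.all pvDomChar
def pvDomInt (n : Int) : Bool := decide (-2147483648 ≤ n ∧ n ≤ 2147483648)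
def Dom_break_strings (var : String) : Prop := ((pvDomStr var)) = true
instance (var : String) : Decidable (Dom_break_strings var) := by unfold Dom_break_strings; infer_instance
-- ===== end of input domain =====

-- B replaces A's element-by-element accumulator-and-parity loop with zipping the two
-- strided slices chain[::2] and chain[1::2] (objective: idiomatic; same O(n) cost).

-- ===== PORT A =====
-- A's loop: walk the characters in order, appending to the pending pair `a`,
-- flushing `a` to the output after every odd index (the index counter `i` tracks parity).
def breakGoA : List String → List String → Nat → List (List String) → List (List String)
  | [], _a, _i, out => out
  | c :: rest, a, i, out =>
    let a' := a ++ [c]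
    if i % 2 ≠ 0 then breakGoA rest [] (i + 1) (out ++ [a'])
    else breakGoA rest a' (i + 1) out

def break_strings (var : String) : List (List String) :=
  breakGoA (var.toList.map (fun c => String.singleton c)) [] 0 []

-- ===== PORT B =====
def break_strings_alt (var : String) : List (List String) :=
  match PySem.List.slice? (var.toList.map (fun c => String.singleton c)) none none 2,
        PySem.List.slice? (var.toList.map (fun c => String.singleton c)) (some 1) none 2 with
  | some evens, some odds => (List.zip evens odds).map (fun p => [p.1, p.2])
  | _, _ => []   -- unreachable: step 2 ≠ 0, so both slices are `some`

-- ===== PRECONDITION & SPEC =====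
def Spec_break_strings (var : String) (out : List (List String)) : Prop := out = break_strings_alt var
instance (var : String) (out : List (List String)) : Decidable (Spec_break_strings var out) := by unfold Spec_break_strings; infer_instance

-- ===== CLAIM (what is proved, stated in full; the proofs are below) =====
def Claim_equal_break_strings : Prop := ∀ (var : String), Dom_break_strings var → Spec_break_strings var (break_strings var)

-- ===== LEMMAS AND PROOFS =====

-- every other element, starting at the head
def eo {α : Type} : List α → List α
  | [] => []
  | [a] => [a]
  | a :: _ :: r => a :: eo r

theorem eo_cons {α : Type} (a : α) (l : List α) : eo (a :: l) = a :: eo l.tail := by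
  cases l <;> rfl

theorem filterMap_even {α : Type} : ∀ xs : List α,
    List.filterMap (fun k : Nat => xs[2 * k]?) (List.range ((xs.length + 1) / 2)) = eo xs := by
  intro xs
  induction xs using eo.induct with
  | case1 => simp [eo]
  | case2 a => simp [eo]
  | case3 a b r ih =>
    have hc : ((a :: b :: r).length + 1) / 2 = (r.length + 1) / 2 + 1 := by
      simp; omega
    rw [hc, List.range_succ_eq_map, List.filterMap_cons, List.filterMap_map]
    have h0 : (a :: b :: r)[2 * 0]? = some a := rfl
    rw [h0]
    have : (fun k : Nat => (a :: b :: r)[2 * (k + 1)]?) = fun k : Nat => r[2 * k]? := by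
      funext k
      have : 2 * (k + 1) = 2 * k + 1 + 1 := by omega
      rw [this]
      simp
    simp only [Function.comp_def, this]
    rw [ih]
    rfl

theorem slice?_step2_even {α : Type} (xs : List α) :
    PySem.List.slice? xs none none 2 = some (eo xs) := by
  rw [PySem.List.slice?]
  simp only [PySem.List.sliceIndices]
  norm_num
  have hcnt : (if 0 < xs.length then (((xs.length : Int) + 2 - 1) / 2).toNat else 0)
      = (xs.length + 1) / 2 := by
    split_ifs with h <;> omega
  rw [hcnt]
  have hidx : ∀ k : Nat, ((2 * (k : Int)).toNat) = 2 * k := by intro k; omega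
  simp only [hidx]
  exact filterMap_even xs

theorem slice?_step2_odd {α : Type} (xs : List α) :
    PySem.List.slice? xs (some 1) none 2 = some (eo xs.tail) := by
  cases xs with
  | nil =>
    simp [PySem.List.slice?, PySem.List.sliceIndices, eo]
  | cons x r =>
    rw [PySem.List.slice?]
    simp only [PySem.List.sliceIndices]
    norm_num
    have hcnt : (if 0 < r.length then (((r.length : Int) + 2 - 1) / 2).toNat else 0)
        = (r.length + 1) / 2 := by
      split_ifs with h <;> omega
    rw [hcnt]
    have hidx : ∀ k : Nat, ((1 + 2 * (k : Int)).toNat) = 2 * k + 1 := by intro k; omega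
    simp only [hidx, List.getElem?_cons_succ]
    exact filterMap_even r

-- B's value on an arbitrary element list
def pairsOf {α : Type} (xs : List α) : List (List α) :=
  (List.zip (eo xs) (eo xs.tail)).map (fun p => [p.1, p.2])

theorem pairsOf_nil {α : Type} : pairsOf ([] : List α) = [] := rfl
theorem pairsOf_single {α : Type} (a : α) : pairsOf [a] = [] := rfl
theorem pairsOf_cons2 {α : Type} (a b : α) (r : List α) :
    pairsOf (a :: b :: r) = [a, b] :: pairsOf r := by
  unfold pairsOf
  rw [show eo (a :: b :: r) = a :: eo r from rfl]
  rw [show (a :: b :: r).tail = b :: r from rfl, eo_cons]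
  rfl

theorem breakGoA_spec : ∀ (xs : List String) (out : List (List String)) (i : Nat),
    i % 2 = 0 → breakGoA xs [] i out = out ++ pairsOf xs := by
  intro xs
  induction xs using eo.induct with
  | case1 => intro out i _; simp [breakGoA, pairsOf_nil]
  | case2 a =>
    intro out i hi
    rw [breakGoA]
    simp only [List.nil_append]
    rw [if_neg (by omega)]
    simp [breakGoA, pairsOf_single]
  | case3 a b r ih =>
    intro out i hi
    rw [breakGoA]
    simp only [List.nil_append]
    rw [if_neg (by omega)]
    rw [breakGoA]
    rw [if_pos (by omega)]
    rw [ih (out ++ [[a] ++ [b]]) (i + 1 + 1) (by omega)]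
    rw [pairsOf_cons2]
    simp

-- ===== VERDICT (by name: the statement is the Claim_ definition above) =====
theorem break_strings_spec : Claim_equal_break_strings := by
  intro var _
  unfold Spec_break_strings break_strings break_strings_alt
  rw [slice?_step2_even, slice?_step2_odd]
  rw [breakGoA_spec _ _ 0 rfl]
  rfl
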